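-- pv_equiv track=rewrite | github.com/pipefunc/pipefunc | docs/source/conf.py | _change_alerts_to_admonitions
-- ===== SOURCE A (Python) =====
-- def _change_alerts_to_admonitions(input_text: str) -> str:
--     # Splitting the text into lines
--     lines = input_text.split("\n")
--
--     # Placeholder for the edited text
--     edited_text = []
--
--     # Mapping of markdown markers to their new format
--     mapping = {
--         "IMPORTANT": "important",
--         "NOTE": "note",
--         "TIP": "tip",
--         "WARNING": "caution",
--     }
--
--     # Variable to keep track of the current block type
--     current_block_type = None
--
--     for line in lines:
--         # Check if the line starts with any of the markers
--         if any(line.strip().startswith(f"> [!{marker}]") for marker in mapping):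
--             # Find the marker and set the current block type
--             current_block_type = next(marker for marker in mapping if f"> [!{marker}]" in line)
--             # Start of a new block
--             edited_text.append("```{" + mapping[current_block_type] + "}")
--         elif current_block_type and line.strip() == ">":
--             # Empty line within the block, skip it
--             continue
--         elif current_block_type and not line.strip().startswith(">"):
--             # End of the current block
--             edited_text.append("```")
--             edited_text.append(line)  # Add the current line as it is
--             current_block_type = None  # Reset the block type
--         elif current_block_type:
--             # Inside the block, so remove '>' and add the line
--             edited_text.append(line.lstrip("> ").rstrip())
--         else:
--             # Outside any block, add the line as it is
--             edited_text.append(line)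
--
--     # Join the edited lines back into a single string
--     return "\n".join(edited_text)
-- ===== SOURCE B (Python) =====
-- def _change_alerts_to_admonitions(input_text: str) -> str:
--     lines = input_text.split("\n")
--     n = len(lines)
--     mapping = {
--         "IMPORTANT": "important",
--         "NOTE": "note",
--         "TIP": "tip",
--         "WARNING": "caution",
--     }
--     out = []
--     i = 0
--     while i < n:
--         line = lines[i]
--         if any(line.strip().startswith(f"> [!{marker}]") for marker in mapping):
--             # consume the whole alert block with an inner loop
--             while i < n:
--                 line = lines[i]
--                 if any(line.strip().startswith(f"> [!{marker}]") for marker in mapping):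
--                     marker = next(m for m in mapping if f"> [!{m}]" in line)
--                     out.append("```{" + mapping[marker] + "}")
--                 elif line.strip() == ">":
--                     pass
--                 elif not line.strip().startswith(">"):
--                     break
--                 else:
--                     out.append(line.lstrip("> ").rstrip())
--                 i += 1
--             if i < n:
--                 out.append("```")
--             # do not advance: the terminating line is re-handled by the outer loop
--         else:
--             out.append(line)
--             i += 1
--     return "\n".join(out)
-- ===== Notes on version B (the rewrite author's own statement) =====
-- stated objective: alternative
-- what changed: Replaces A's single-pass state-machine loop (a current_block_type flag threaded through every line) by a two-level loop: an outer loop over lines and an inner loop that consumes one whole alert block and leaves the terminating line for the outer loop, closing the fence only when the block did not reach end-of-input.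
import Mathlib
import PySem

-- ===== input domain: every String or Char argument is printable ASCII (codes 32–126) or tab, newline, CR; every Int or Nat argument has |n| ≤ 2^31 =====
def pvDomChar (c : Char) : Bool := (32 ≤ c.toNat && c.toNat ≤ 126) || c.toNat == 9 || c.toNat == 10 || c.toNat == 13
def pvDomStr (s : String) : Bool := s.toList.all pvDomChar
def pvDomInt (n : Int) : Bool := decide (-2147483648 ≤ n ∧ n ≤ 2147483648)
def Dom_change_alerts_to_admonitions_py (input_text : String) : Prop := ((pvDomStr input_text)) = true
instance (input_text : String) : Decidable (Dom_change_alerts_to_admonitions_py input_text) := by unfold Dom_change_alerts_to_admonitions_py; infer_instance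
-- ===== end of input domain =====

-- B replaces A's single-pass state-machine loop by an index-free two-level loop (outer over lines, inner consuming a whole alert block); same O(n) cost, a different decomposition.

-- ===== PORT A =====
-- the 'mapping' dict, as an association list in insertion order
def pvMapping : List (String × String) :=
  [("IMPORTANT", "important"), ("NOTE", "note"), ("TIP", "tip"), ("WARNING", "caution")]

-- f"> [!{marker}]"
def pvAlertTag (m : String) : String := "> [!" ++ m ++ "]"

-- any(line.strip().startswith(f"> [!{marker}]") for marker in mapping)
def pvIsAlertStart (line : String) : Bool :=
  pvMapping.any (fun p => PySem.Str.startswith (PySem.Str.strip line) (pvAlertTag p.1))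

-- next(marker for marker in mapping if f"> [!{marker}]" in line), paired with mapping[marker];
-- none = StopIteration (unreachable under the pvIsAlertStart guard, see pvNextMarker_of_alert)
def pvNextMarker (line : String) : Option (String × String) :=
  pvMapping.find? (fun p => PySem.Str.isIn (pvAlertTag p.1) line)

-- line.lstrip("> "): hand port, exact — drops leading characters from the set {'>', ' '}
def pvLstripGtSpace (line : String) : String :=
  String.ofList (line.toList.dropWhile (fun c => c == '>' || c == ' '))

-- line.lstrip("> ").rstrip()
def pvContent (line : String) : String := PySem.Str.rstrip (pvLstripGtSpace line)

-- one iteration of A's for-loop; the state is (current_block_type, edited_text);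
-- current_block_type is a marker string or None, and markers are nonempty, so Python's
-- truthiness test 'current_block_type and …' is cur.isSome
def pvStepA (st : Option String × List String) (line : String) : Option String × List String :=
  let (cur, acc) := st
  if pvIsAlertStart line then
    match pvNextMarker line with
    | some p => (some p.1, acc ++ ["```{" ++ p.2 ++ "}"])
    | none => (cur, acc)  -- unreachable (Python: StopIteration)
  else if cur.isSome && (PySem.Str.strip line == ">") then
    (cur, acc)
  else if cur.isSome && !(PySem.Str.startswith (PySem.Str.strip line) ">") then
    (none, acc ++ ["```", line])
  else if cur.isSome then
    (cur, acc ++ [pvContent line])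
  else
    (cur, acc ++ [line])

def change_alerts_to_admonitions_py (input_text : String) : String :=
  -- input_text.split("\n"); split? is none only for sep = "", so getD never fires
  let lines := (PySem.Str.split? input_text "\n").getD []
  let res := lines.foldl pvStepA (none, [])
  PySem.Str.join "\n" res.2

-- ===== PORT B =====
-- the inner while-loop of B: consumes the lines of one alert block, returns
-- (emitted lines, remaining lines); break returns the terminating line unconsumed
def pvInnerB : List String → List String × List String
  | [] => ([], [])
  | line :: rest =>
    if pvIsAlertStart line then
      match pvNextMarker line with
      | some p =>
        let r := pvInnerB rest
        (("```{" ++ p.2 ++ "}") :: r.1, r.2)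
      | none => pvInnerB rest  -- unreachable (Python: StopIteration)
    else if PySem.Str.strip line == ">" then
      pvInnerB rest
    else if !(PySem.Str.startswith (PySem.Str.strip line) ">") then
      ([], line :: rest)  -- break: do not consume the terminating line
    else
      let r := pvInnerB rest
      (pvContent line :: r.1, r.2)

-- the remainder pvInnerB leaves is a suffix of its input (for pvOuterB's termination)
theorem pvInnerB_snd_length : ∀ ls : List String, (pvInnerB ls).2.length ≤ ls.length := by
  intro ls
  induction ls with
  | nil => simp [pvInnerB]
  | cons line rest ih =>
    simp only [pvInnerB]
    split
    · cases h : pvNextMarker line <;> simp_all <;> omega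
    · split
      · simpa using Nat.le_succ_of_le ih
      · split
        · simp
        · simpa using Nat.le_succ_of_le ih

theorem pvInnerB_cons_alert (line : String) (rest : List String)
    (h : pvIsAlertStart line = true) :
    (pvInnerB (line :: rest)).2 = (pvInnerB rest).2 := by
  simp only [pvInnerB, h, if_true]
  cases hp : pvNextMarker line <;> simp

-- the outer while-loop of B
def pvOuterB : List String → List String
  | [] => []
  | line :: rest =>
    if h : pvIsAlertStart line then
      let r := pvInnerB (line :: rest)
      r.1 ++ (match r.2 with | [] => [] | _ :: _ => ["```"]) ++ pvOuterB r.2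
    else
      line :: pvOuterB rest
termination_by ls => ls.length
decreasing_by
  · simp only [pvInnerB_cons_alert line rest h]
    exact Nat.lt_succ_of_le (pvInnerB_snd_length rest)
  · simp

def change_alerts_to_admonitions_py_alt (input_text : String) : String :=
  let lines := (PySem.Str.split? input_text "\n").getD []
  PySem.Str.join "\n" (pvOuterB lines)

-- ===== PRECONDITION & SPEC =====
def Spec_change_alerts_to_admonitions_py (input_text : String) (out : String) : Prop := out = change_alerts_to_admonitions_py_alt input_text
instance (input_text : String) (out : String) : Decidable (Spec_change_alerts_to_admonitions_py input_text out) := by unfold Spec_change_alerts_to_admonitions_py; infer_instance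

-- ===== CLAIM (what is proved, stated in full; the proofs are below) =====
def Claim_equal_change_alerts_to_admonitions_py : Prop := ∀ (input_text : String), Dom_change_alerts_to_admonitions_py input_text → Spec_change_alerts_to_admonitions_py input_text (change_alerts_to_admonitions_py input_text)

-- ===== LEMMAS AND PROOFS =====

-- str.strip() yields an infix of the original string
theorem pvStrip_infix (s : String) : (PySem.Str.strip s).toList <:+: s.toList := by
  rw [PySem.Str.toList_strip]
  unfold PySem.Chars.strip PySem.Chars.lstrip PySem.Chars.rstrip
  have h1 : (List.dropWhile PySem.Chars.isspace ((List.dropWhile PySem.Chars.isspace s.toList).reverse)).reverse <+: List.dropWhile PySem.Chars.isspace s.toList := by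
    have := List.dropWhile_suffix (p := PySem.Chars.isspace) (l := (List.dropWhile PySem.Chars.isspace s.toList).reverse)
    exact List.reverse_suffix.mp (by simpa using this)
  exact h1.isInfix.trans (List.dropWhile_suffix _).isInfix

-- under the pvIsAlertStart guard, Python's next(...) always finds a marker
theorem pvNextMarker_of_alert (line : String) (h : pvIsAlertStart line = true) :
    pvNextMarker line ≠ none := by
  unfold pvIsAlertStart at h
  rw [List.any_eq_true] at h
  obtain ⟨p, hmem, hsw⟩ := h
  have hpfx : (pvAlertTag p.1).toList <+: (PySem.Str.strip line).toList := by
    rw [PySem.Str.startswith_eq] at hsw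
    exact (PySem.Chars.startswith_iff _ _).mp hsw
  have hin : PySem.Str.isIn (pvAlertTag p.1) line = true :=
    (PySem.Str.isIn_iff_infix _ _).mpr (hpfx.isInfix.trans (pvStrip_infix line))
  unfold pvNextMarker
  intro hnone
  rw [List.find?_eq_none] at hnone
  exact absurd hin (by simpa using hnone p hmem)

-- the joint loop invariant: A's fold from the out-of-block state computes pvOuterB,
-- and from an in-block state it computes pvInnerB plus the closing fence and the rest
theorem pvMain : ∀ (n : Nat) (ls : List String), ls.length ≤ n →
    (∀ acc, (ls.foldl pvStepA (none, acc)).2 = acc ++ pvOuterB ls) ∧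
    (∀ acc (m : String), (ls.foldl pvStepA (some m, acc)).2 =
      acc ++ (pvInnerB ls).1 ++
        (match (pvInnerB ls).2 with | [] => [] | _ :: _ => ["```"]) ++
        pvOuterB (pvInnerB ls).2) := by
  intro n
  induction n with
  | zero =>
    intro ls hlen
    rw [Nat.le_zero, List.length_eq_zero_iff] at hlen
    subst hlen
    simp [pvInnerB, pvOuterB]
  | succ n ih =>
    intro ls hlen
    match ls with
    | [] => simp [pvInnerB, pvOuterB]
    | line :: rest =>
      simp only [List.length_cons, Nat.add_one_le_add_one_iff] at hlen
      by_cases h1 : pvIsAlertStart line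
      · cases hp : pvNextMarker line with
        | none => exact absurd hp (pvNextMarker_of_alert line h1)
        | some p =>
          constructor
          · intro acc
            rw [List.foldl_cons]
            simp only [pvStepA, h1, hp, if_true]
            rw [(ih rest hlen).2]
            simp only [pvOuterB, h1, dif_pos]
            simp [pvInnerB, h1, hp]
          · intro acc m
            rw [List.foldl_cons]
            simp only [pvStepA, h1, hp, if_true]
            rw [(ih rest hlen).2]
            simp [pvInnerB, h1, hp]
      · rw [Bool.not_eq_true] at h1
        by_cases h2 : PySem.Str.strip line == ">"
        · constructor
          · intro acc
            rw [List.foldl_cons]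
            simp only [pvStepA, h1, Bool.false_eq_true, if_false, Option.isSome_none, Bool.false_and]
            rw [(ih rest hlen).1]
            simp only [pvOuterB, h1]
            simp
          · intro acc m
            rw [List.foldl_cons]
            simp only [pvStepA, h1, h2, Bool.false_eq_true, if_false, Option.isSome_some, Bool.true_and, if_true]
            rw [(ih rest hlen).2]
            simp [pvInnerB, h1, h2]
        · rw [Bool.not_eq_true] at h2
          by_cases h3 : PySem.Str.startswith (PySem.Str.strip line) ">"
          · have h3' : PySem.Chars.startswith (PySem.Chars.strip line.toList) ['>'] = true := by
              simpa using h3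
            constructor
            · intro acc
              rw [List.foldl_cons]
              simp only [pvStepA, h1, Bool.false_eq_true, if_false, Option.isSome_none, Bool.false_and]
              rw [(ih rest hlen).1]
              simp only [pvOuterB, h1]
              simp
            · intro acc m
              rw [List.foldl_cons]
              simp only [pvStepA, h1, h2, h3, Bool.false_eq_true, if_false, Option.isSome_some, Bool.true_and, Bool.not_true, if_true]
              rw [(ih rest hlen).2]
              simp [pvInnerB, h1, h2, h3']
          · rw [Bool.not_eq_true] at h3
            have h3' : PySem.Chars.startswith (PySem.Chars.strip line.toList) ['>'] = false := by
              simpa using h3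
            constructor
            · intro acc
              rw [List.foldl_cons]
              simp only [pvStepA, h1, Bool.false_eq_true, if_false, Option.isSome_none, Bool.false_and]
              rw [(ih rest hlen).1]
              simp only [pvOuterB, h1]
              simp
            · intro acc m
              rw [List.foldl_cons]
              simp only [pvStepA, h1, h2, h3, Bool.false_eq_true, if_false, Option.isSome_some, Bool.true_and, Bool.not_false, if_true]
              rw [(ih rest hlen).1]
              simp [pvInnerB, pvOuterB, h1, h2, h3']

-- ===== VERDICT (by name: the statement is the Claim_ definition above) =====
theorem change_alerts_to_admonitions_py_spec : Claim_equal_change_alerts_to_admonitions_py := by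
  intro input_text _
  unfold Spec_change_alerts_to_admonitions_py
  unfold change_alerts_to_admonitions_py change_alerts_to_admonitions_py_alt
  have := (pvMain ((PySem.Str.split? input_text "\n").getD []).length _ le_rfl).1 []
  simp only [this, List.nil_append]
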